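-- pv_equiv track=rewrite | github.com/R21Digital/Project-MorningStar | archive/backups/consolidated/backup_20250806_001058/modules/buff_advisor/build_integration.py | _validate_profession_compatibility
-- ===== SOURCE A (Python) =====
-- from typing import Dict, List, Any, Optional
--
-- def _validate_profession_compatibility(stats: Dict[str, int],
--                                       professions: List[str]) -> Dict[str, Any]:
--     """Validate if stats are suitable for the professions."""
--     issues = []
--     warnings = []
--     suggestions = []
--
--     for profession in professions:
--         if profession == "rifleman":
--             if stats.get("agility", 0) < 100:
--                 warnings.append(f"Low agility ({stats.get('agility', 0)}) for rifleman")
--             if stats.get("stamina", 0) < 80: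
--                 suggestions.append("Consider buffing stamina for rifleman")
--
--         elif profession == "pistoleer":
--             if stats.get("agility", 0) < 90:
--                 warnings.append(f"Low agility ({stats.get('agility', 0)}) for pistoleer")
--
--         elif profession in ["medic", "doctor"]:
--             if stats.get("mind", 0) < 100:
--                 warnings.append(f"Low mind ({stats.get('mind', 0)}) for {profession}")
--             if stats.get("focus", 0) < 90:
--                 suggestions.append(f"Consider buffing focus for {profession}")
--
--     return {"issues": issues, "warnings": warnings, "suggestions": suggestions}
-- ===== SOURCE B (Python) =====
-- def _mind_rules(name):
--     return [
--         ("mind", 100, True, lambda v, n=name: f"Low mind ({v}) for {n}"),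
--         ("focus", 90, False, lambda v, n=name: f"Consider buffing focus for {n}"),
--     ]
--
-- _RULES = {
--     "rifleman": [
--         ("agility", 100, True, lambda v: f"Low agility ({v}) for rifleman"),
--         ("stamina", 80, False, lambda v: "Consider buffing stamina for rifleman"),
--     ],
--     "pistoleer": [
--         ("agility", 90, True, lambda v: f"Low agility ({v}) for pistoleer"),
--     ],
--     "medic": _mind_rules("medic"),
--     "doctor": _mind_rules("doctor"),
-- }
--
-- def _validate_profession_compatibility(stats, professions):
--     warnings, suggestions = [], []
--     for profession in professions:
--         for key, threshold, is_warning, msg in _RULES.get(profession, []):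
--             value = stats.get(key, 0)
--             if value < threshold:
--                 (warnings if is_warning else suggestions).append(msg(value))
--     return {"issues": [], "warnings": warnings, "suggestions": suggestions}
-- ===== Notes on version B (the rewrite author's own statement) =====
-- stated objective: alternative
-- what changed: Replaced the per-profession if/elif branch cascade by a static rules table (profession -> ordered list of (stat, threshold, bucket, message) checks, medic/doctor sharing a generated entry) driven by one generic loop.
import Mathlib
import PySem

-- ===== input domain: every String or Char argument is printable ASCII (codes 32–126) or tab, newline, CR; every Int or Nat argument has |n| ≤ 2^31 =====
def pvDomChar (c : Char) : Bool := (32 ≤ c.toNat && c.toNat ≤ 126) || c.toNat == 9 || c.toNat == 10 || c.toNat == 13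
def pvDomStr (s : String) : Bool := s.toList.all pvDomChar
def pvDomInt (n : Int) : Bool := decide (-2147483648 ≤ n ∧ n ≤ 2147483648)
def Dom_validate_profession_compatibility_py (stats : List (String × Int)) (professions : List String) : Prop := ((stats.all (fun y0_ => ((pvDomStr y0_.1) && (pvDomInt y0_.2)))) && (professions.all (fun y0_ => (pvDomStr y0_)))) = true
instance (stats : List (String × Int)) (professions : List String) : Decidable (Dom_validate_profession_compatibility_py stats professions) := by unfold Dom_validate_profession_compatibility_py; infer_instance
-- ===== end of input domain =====

-- B replaces A's if/elif branch cascade by a static rules table driven by one generic loop; same cost, return value proved equal.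

-- ===== PORT A =====
-- stats.get(key, 0)
def pvStatsGet (stats : List (String × Int)) (key : String) : Int :=
  (PySem.Dict.mk stats).getD key 0

-- step of A's 'for profession in professions' loop, state = (warnings, suggestions)
def pvStepA (stats : List (String × Int)) (acc : List String × List String) (p : String) :
    List String × List String :=
  let ws := acc.1
  let ss := acc.2
  if p == "rifleman" then
    let ws := if pvStatsGet stats "agility" < 100 then
        ws ++ ["Low agility (" ++ PySem.Int.toStr (pvStatsGet stats "agility") ++ ") for rifleman"]
      else ws
    let ss := if pvStatsGet stats "stamina" < 80 then
        ss ++ ["Consider buffing stamina for rifleman"]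
      else ss
    (ws, ss)
  else if p == "pistoleer" then
    let ws := if pvStatsGet stats "agility" < 90 then
        ws ++ ["Low agility (" ++ PySem.Int.toStr (pvStatsGet stats "agility") ++ ") for pistoleer"]
      else ws
    (ws, ss)
  else if p == "medic" || p == "doctor" then
    let ws := if pvStatsGet stats "mind" < 100 then
        ws ++ ["Low mind (" ++ PySem.Int.toStr (pvStatsGet stats "mind") ++ ") for " ++ p]
      else ws
    let ss := if pvStatsGet stats "focus" < 90 then
        ss ++ ["Consider buffing focus for " ++ p]
      else ss
    (ws, ss)
  else (ws, ss)

def validate_profession_compatibility_py (stats : List (String × Int)) (professions : List String) : List (String × List String) :=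
  let r := professions.foldl (pvStepA stats) ([], [])
  [("issues", []), ("warnings", r.1), ("suggestions", r.2)]

-- ===== PORT B =====
-- a rule: (stat key, threshold, goes-to-warnings?, message builder)
def pvRule : Type := String × Int × Bool × (Int → String)

def pvMindRules (name : String) : List pvRule :=
  [("mind", 100, true, fun v => "Low mind (" ++ PySem.Int.toStr v ++ ") for " ++ name),
   ("focus", 90, false, fun _ => "Consider buffing focus for " ++ name)]

def pvRulesTable : PySem.Dict String (List pvRule) :=
  PySem.Dict.mk
    [("rifleman",
       [("agility", 100, true, fun v => "Low agility (" ++ PySem.Int.toStr v ++ ") for rifleman"),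
        ("stamina", 80, false, fun _ => "Consider buffing stamina for rifleman")]),
     ("pistoleer",
       [("agility", 90, true, fun v => "Low agility (" ++ PySem.Int.toStr v ++ ") for pistoleer")]),
     ("medic", pvMindRules "medic"),
     ("doctor", pvMindRules "doctor")]

-- inner 'for key, threshold, is_warning, msg in rules' loop
def pvApplyRule (stats : List (String × Int)) (acc : List String × List String) (r : pvRule) :
    List String × List String :=
  let value := pvStatsGet stats r.1
  if value < r.2.1 then
    if r.2.2.1 then (acc.1 ++ [r.2.2.2 value], acc.2) else (acc.1, acc.2 ++ [r.2.2.2 value])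
  else acc

def pvStepB (stats : List (String × Int)) (acc : List String × List String) (p : String) :
    List String × List String :=
  (pvRulesTable.getD p []).foldl (pvApplyRule stats) acc

def validate_profession_compatibility_py_alt (stats : List (String × Int)) (professions : List String) : List (String × List String) :=
  let r := professions.foldl (pvStepB stats) ([], [])
  [("issues", []), ("warnings", r.1), ("suggestions", r.2)]

-- ===== PRECONDITION & SPEC =====
def Spec_validate_profession_compatibility_py (stats : List (String × Int)) (professions : List String) (out : List (String × List String)) : Prop := out = validate_profession_compatibility_py_alt stats professions
instance (stats : List (String × Int)) (professions : List String) (out : List (String × List String)) : Decidable (Spec_validate_profession_compatibility_py stats professions out) := by unfold Spec_validate_profession_compatibility_py; infer_instance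

-- ===== CLAIM (what is proved, stated in full; the proofs are below) =====
def Claim_equal_validate_profession_compatibility_py : Prop := ∀ (stats : List (String × Int)) (professions : List String), Dom_validate_profession_compatibility_py stats professions → Spec_validate_profession_compatibility_py stats professions (validate_profession_compatibility_py stats professions)

-- ===== LEMMAS AND PROOFS =====

theorem pvStep_eq (stats : List (String × Int)) (acc : List String × List String) (p : String) :
    pvStepA stats acc p = pvStepB stats acc p := by
  by_cases h1 : p = "rifleman"
  · subst h1
    simp [pvStepA, pvStepB, pvRulesTable, pvApplyRule, PySem.Dict.getD_eq_get?_getD,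
      PySem.Dict.get?_mk_cons]
    split_ifs <;> rfl
  · by_cases h2 : p = "pistoleer"
    · subst h2
      simp [pvStepA, pvStepB, pvRulesTable, pvApplyRule, PySem.Dict.getD_eq_get?_getD,
        PySem.Dict.get?_mk_cons]
      split_ifs <;> rfl
    · by_cases h3 : p = "medic"
      · subst h3
        simp [pvStepA, pvStepB, pvRulesTable, pvMindRules, pvApplyRule,
          PySem.Dict.getD_eq_get?_getD, PySem.Dict.get?_mk_cons]
        split_ifs <;> rfl
      · by_cases h4 : p = "doctor"
        · subst h4
          simp [pvStepA, pvStepB, pvRulesTable, pvMindRules, pvApplyRule,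
            PySem.Dict.getD_eq_get?_getD, PySem.Dict.get?_mk_cons]
          split_ifs <;> rfl
        · simp [pvStepA, pvStepB, pvRulesTable, PySem.Dict.getD_eq_get?_getD,
            PySem.Dict.get?_mk_cons, h1, h2, h3, h4,
            beq_iff_eq, Ne.symm h1, Ne.symm h2, Ne.symm h3, Ne.symm h4]
          rfl

-- ===== VERDICT (by name: the statement is the Claim_ definition above) =====
theorem validate_profession_compatibility_py_spec : Claim_equal_validate_profession_compatibility_py := by
  intro stats professions _
  show _ = _
  unfold validate_profession_compatibility_py validate_profession_compatibility_py_alt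
  have : pvStepA stats = pvStepB stats := funext fun acc => funext fun p => pvStep_eq stats acc p
  rw [this]
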